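-- pv_equiv track=rewrite | github.com/somesoo/uma | regex.py | extend_motif
-- ===== SOURCE A (Python) =====
-- from typing import Dict, List, Sequence, Set, Tuple
--
-- IUPAC_MAP = {
--     frozenset({'A'}): 'A', frozenset({'C'}): 'C', frozenset({'G'}): 'G', frozenset({'T'}): 'T',
--     frozenset({'A','G'}): 'R', frozenset({'C','T'}): 'Y', frozenset({'G','C'}): 'S', frozenset({'A','T'}): 'W',
--     frozenset({'G','T'}): 'K', frozenset({'A','C'}): 'M',
--     frozenset({'C','G','T'}): 'B', frozenset({'A','G','T'}): 'D',
--     frozenset({'A','C','T'}): 'H', frozenset({'A','C','G'}): 'V',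
--     frozenset({'A','C','G','T'}): 'N'
-- }
--
-- def chars2code(chars: Set[str], use_iupac: bool) -> str:
--     if len(chars) == 1:
--         return next(iter(chars))
--     key = frozenset(chars)
--     if use_iupac:
--         return IUPAC_MAP.get(key, 'N')  # fallback na N jeśli brak odwzorowania
--     else:
--         return "[" + "".join(sorted(chars)) + "]"
--
-- def extend_motif(kmer:str, seqs_pos:Sequence[str], flank:int, use_iupac:bool)->str:
--     k=len(kmer)
--     left_sets=[set() for _ in range(flank)]
--     right_sets=[set() for _ in range(flank)]
--     for seq in seqs_pos:
--         for i in range(len(seq)-k+1):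
--             if seq[i:i+k]!=kmer: continue
--             for f in range(1,flank+1):
--                 if i-f>=0: left_sets[flank-f].add(seq[i-f])
--                 if i+k-1+f<len(seq): right_sets[f-1].add(seq[i+k+f-1])
--     left=''.join(chars2code(s,use_iupac) for s in left_sets)
--     right=''.join(chars2code(s,use_iupac) for s in right_sets)
--     return f'{left}{kmer}{right}'
-- ===== SOURCE B (Python) =====
-- # B: gather occurrences first, then aggregate each flank column independently;
-- # consensus code looked up in a table keyed by the sorted character string.
--
-- _TAB = {'AG': 'R', 'CT': 'Y', 'CG': 'S', 'AT': 'W', 'GT': 'K', 'AC': 'M',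
--         'CGT': 'B', 'AGT': 'D', 'ACT': 'H', 'ACG': 'V', 'ACGT': 'N'}
--
-- def _code(chars, use_iupac):
--     key = ''.join(sorted(chars))
--     if len(key) == 1:
--         return key
--     if use_iupac:
--         return _TAB.get(key, 'N')
--     return '[' + key + ']'
--
-- def extend_motif(kmer, seqs_pos, flank, use_iupac):
--     k = len(kmer)
--     fl = max(flank, 0)
--     occs = [(seq, i) for seq in seqs_pos
--             for i in range(len(seq) - k + 1) if seq[i:i+k] == kmer]
--     left_cols = [{s[i - (fl - c)] for (s, i) in occs if i >= fl - c}
--                  for c in range(fl)]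
--     right_cols = [{s[i + k + c] for (s, i) in occs if i + k + c < len(s)}
--                   for c in range(fl)]
--     left = ''.join(_code(col, use_iupac) for col in left_cols)
--     right = ''.join(_code(col, use_iupac) for col in right_cols)
--     return f'{left}{kmer}{right}'
-- ===== Notes on version B (the rewrite author's own statement) =====
-- stated objective: alternative
-- what changed: Replaces the interleaved triple loop that mutates per-column sets with a gather-then-aggregate decomposition: first collect all kmer occurrences, then build each flank column as an independent set comprehension, and code columns via a table keyed by the sorted character string instead of frozensets.
import Mathlib
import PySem

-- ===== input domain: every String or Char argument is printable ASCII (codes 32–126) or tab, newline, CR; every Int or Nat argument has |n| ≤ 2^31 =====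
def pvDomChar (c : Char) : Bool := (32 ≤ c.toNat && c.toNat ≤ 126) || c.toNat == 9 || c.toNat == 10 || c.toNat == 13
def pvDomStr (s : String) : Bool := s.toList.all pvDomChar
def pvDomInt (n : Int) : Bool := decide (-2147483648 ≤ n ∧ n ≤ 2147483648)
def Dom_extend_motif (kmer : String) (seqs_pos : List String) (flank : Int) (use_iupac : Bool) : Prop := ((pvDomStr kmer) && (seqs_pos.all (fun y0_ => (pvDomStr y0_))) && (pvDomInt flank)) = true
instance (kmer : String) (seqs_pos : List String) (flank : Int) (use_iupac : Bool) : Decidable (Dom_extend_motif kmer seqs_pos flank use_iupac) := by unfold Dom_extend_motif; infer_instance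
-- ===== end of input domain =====

-- B restates A as a gather-then-aggregate decomposition (collect occurrences, then build each
-- flank column independently), with the IUPAC table keyed by sorted strings; objective: alternative.

-- ===== PORT A =====
-- IUPAC_MAP: frozenset keys modelled by their element lists; dict lookup compares keys by set equality
def iupacMap : List (List Char × Char) :=
  [(['A'], 'A'), (['C'], 'C'), (['G'], 'G'), (['T'], 'T'),
   (['A','G'], 'R'), (['C','T'], 'Y'), (['G','C'], 'S'), (['A','T'], 'W'),
   (['G','T'], 'K'), (['A','C'], 'M'),
   (['C','G','T'], 'B'), (['A','G','T'], 'D'),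
   (['A','C','T'], 'H'), (['A','C','G'], 'V'),
   (['A','C','G','T'], 'N')]

-- chars2code; works on List Char (the result string's characters)
def chars2code (chars : PySem.Set Char) (use_iupac : Bool) : List Char :=
  if PySem.Set.len chars = 1 then chars          -- next(iter(chars)) of a 1-element set
  else if use_iupac then
    match iupacMap.find? (fun kv => PySem.Set.equal kv.1 chars) with
    | some kv => [kv.2]
    | none => ['N']
  else '[' :: PySem.List.sorted chars (fun c => c) false ++ [']']

-- sets[j].add(c) (j always in range at the call sites)
def bump (sets : List (PySem.Set Char)) (j : Nat) (c : Char) : List (PySem.Set Char) :=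
  sets.set j (PySem.Set.add (sets.getD j PySem.Set.empty) c)

-- body of `for f in range(1, flank+1)`: the two guarded set-adds
def stepF (sl : List Char) (k : Nat) (flank : Int) (i : Int)
    (st : List (PySem.Set Char) × List (PySem.Set Char)) (f : Int) :
    List (PySem.Set Char) × List (PySem.Set Char) :=
  (if 0 ≤ i - f then bump st.1 (flank - f).toNat (PySem.List.pyGetD sl (i - f) 'N') else st.1,
   if i + (k : Int) - 1 + f < (sl.length : Int) then
     bump st.2 (f - 1).toNat (PySem.List.pyGetD sl (i + (k : Int) + f - 1) 'N')
   else st.2)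

-- body of `for i in range(len(seq)-k+1)`
def stepI (kl : List Char) (sl : List Char) (flank : Int)
    (st : List (PySem.Set Char) × List (PySem.Set Char)) (i : Int) :
    List (PySem.Set Char) × List (PySem.Set Char) :=
  if PySem.List.slice sl (some i) (some (i + (kl.length : Int))) ≠ kl then st
  else (PySem.List.pyRange 1 (flank + 1) 1).foldl (stepF sl kl.length flank i) st

def extend_motif (kmer : String) (seqs_pos : List String) (flank : Int) (use_iupac : Bool) : String :=
  let kl := kmer.toList
  let k := kl.length
  -- [set() for _ in range(flank)]: max(flank,0) empty sets
  let init : List (PySem.Set Char) := List.replicate flank.toNat PySem.Set.empty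
  let st := seqs_pos.foldl
    (fun st seq =>
      (PySem.List.pyRange 0 ((seq.toList.length : Int) - (k : Int) + 1) 1).foldl
        (stepI kl seq.toList flank) st)
    (init, init)
  let left := PySem.Chars.join [] (st.1.map (fun s => chars2code s use_iupac))
  let right := PySem.Chars.join [] (st.2.map (fun s => chars2code s use_iupac))
  String.mk (left ++ kl ++ right)

-- ===== PORT B =====
-- _TAB: consensus codes keyed by the sorted character string
def codeTab : List (List Char × Char) :=
  [(['A','G'], 'R'), (['C','T'], 'Y'), (['C','G'], 'S'), (['A','T'], 'W'),
   (['G','T'], 'K'), (['A','C'], 'M'),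
   (['C','G','T'], 'B'), (['A','G','T'], 'D'),
   (['A','C','T'], 'H'), (['A','C','G'], 'V'),
   (['A','C','G','T'], 'N')]

def code2 (chars : PySem.Set Char) (use_iupac : Bool) : List Char :=
  let key := PySem.List.sorted chars (fun c => c) false
  if key.length = 1 then key
  else if use_iupac then
    match codeTab.find? (fun kv => kv.1 == key) with
    | some kv => [kv.2]
    | none => ['N']
  else '[' :: key ++ [']']

def extend_motif_alt (kmer : String) (seqs_pos : List String) (flank : Int) (use_iupac : Bool) : String :=
  let kl := kmer.toList
  let k := kl.length
  let fl := flank.toNat                          -- max(flank, 0)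
  -- phase 1: every kmer occurrence, as (sequence, index)
  let occs : List (List Char × Int) := seqs_pos.flatMap (fun seq =>
    ((PySem.List.pyRange 0 ((seq.toList.length : Int) - (k : Int) + 1) 1).filter
        (fun i => PySem.List.slice seq.toList (some i) (some (i + (k : Int))) == kl)).map
      (fun i => (seq.toList, i)))
  -- phase 2: one character set per flank column, built independently
  let leftCols : List (PySem.Set Char) := (List.range fl).map (fun c =>
    PySem.Set.ofList ((occs.filter (fun p => p.2 ≥ ((fl - c : Nat) : Int))).map
      (fun p => PySem.List.pyGetD p.1 (p.2 - ((fl - c : Nat) : Int)) 'N')))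
  let rightCols : List (PySem.Set Char) := (List.range fl).map (fun (c : Nat) =>
    PySem.Set.ofList ((occs.filter (fun p => p.2 + (k : Int) + (c : Int) < (p.1.length : Int))).map
      (fun p => PySem.List.pyGetD p.1 (p.2 + (k : Int) + (c : Int)) 'N')))
  let left := PySem.Chars.join [] (leftCols.map (fun s => code2 s use_iupac))
  let right := PySem.Chars.join [] (rightCols.map (fun s => code2 s use_iupac))
  String.mk (left ++ kl ++ right)

-- ===== PRECONDITION & SPEC =====
def Spec_extend_motif (kmer : String) (seqs_pos : List String) (flank : Int) (use_iupac : Bool) (out : String) : Prop := out = extend_motif_alt kmer seqs_pos flank use_iupac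
instance (kmer : String) (seqs_pos : List String) (flank : Int) (use_iupac : Bool) (out : String) : Decidable (Spec_extend_motif kmer seqs_pos flank use_iupac out) := by unfold Spec_extend_motif; infer_instance

-- ===== CLAIM (what is proved, stated in full; the proofs are below) =====
def Claim_equal_extend_motif : Prop := ∀ (kmer : String) (seqs_pos : List String) (flank : Int) (use_iupac : Bool), Dom_extend_motif kmer seqs_pos flank use_iupac → Spec_extend_motif kmer seqs_pos flank use_iupac (extend_motif kmer seqs_pos flank use_iupac)

-- ===== LEMMAS AND PROOFS =====

-- left/right halves of stepF / stepI (proof-side views of A's loop bodies)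
def lstepF (sl : List Char) (flank : Int) (i : Int) (L : List (PySem.Set Char)) (f : Int) :
    List (PySem.Set Char) :=
  if 0 ≤ i - f then bump L (flank - f).toNat (PySem.List.pyGetD sl (i - f) 'N') else L

def rstepF (sl : List Char) (k : Nat) (i : Int) (R : List (PySem.Set Char)) (f : Int) :
    List (PySem.Set Char) :=
  if i + (k : Int) - 1 + f < (sl.length : Int) then
    bump R (f - 1).toNat (PySem.List.pyGetD sl (i + (k : Int) + f - 1) 'N')
  else R

def lstepI (kl : List Char) (sl : List Char) (flank : Int) (L : List (PySem.Set Char)) (i : Int) :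
    List (PySem.Set Char) :=
  if PySem.List.slice sl (some i) (some (i + (kl.length : Int))) ≠ kl then L
  else (PySem.List.pyRange 1 (flank + 1) 1).foldl (lstepF sl flank i) L

def rstepI (kl : List Char) (sl : List Char) (flank : Int) (R : List (PySem.Set Char)) (i : Int) :
    List (PySem.Set Char) :=
  if PySem.List.slice sl (some i) (some (i + (kl.length : Int))) ≠ kl then R
  else (PySem.List.pyRange 1 (flank + 1) 1).foldl (rstepF sl kl.length i) R

-- the (column-index, character) update events of A's inner loop
def lopt (sl : List Char) (flank : Int) (i : Int) (f : Int) : Option (Nat × Char) :=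
  if 0 ≤ i - f then some ((flank - f).toNat, PySem.List.pyGetD sl (i - f) 'N') else none

def ropt (sl : List Char) (k : Nat) (i : Int) (f : Int) : Option (Nat × Char) :=
  if i + (k : Int) - 1 + f < (sl.length : Int) then
    some ((f - 1).toNat, PySem.List.pyGetD sl (i + (k : Int) + f - 1) 'N')
  else none

def bumpE (S : List (PySem.Set Char)) (e : Nat × Char) : List (PySem.Set Char) := bump S e.1 e.2

def levseq (kl : List Char) (sl : List Char) (flank : Int) : List (Nat × Char) :=
  (PySem.List.pyRange 0 ((sl.length : Int) - (kl.length : Int) + 1) 1).flatMap (fun i =>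
    if PySem.List.slice sl (some i) (some (i + (kl.length : Int))) == kl then
      (PySem.List.pyRange 1 (flank + 1) 1).filterMap (lopt sl flank i)
    else [])

def revseq (kl : List Char) (sl : List Char) (flank : Int) : List (Nat × Char) :=
  (PySem.List.pyRange 0 ((sl.length : Int) - (kl.length : Int) + 1) 1).flatMap (fun i =>
    if PySem.List.slice sl (some i) (some (i + (kl.length : Int))) == kl then
      (PySem.List.pyRange 1 (flank + 1) 1).filterMap (ropt sl kl.length i)
    else [])


lemma foldl_opt {α β ε : Type} (l : List α) (g : α → Option ε) (h : β → ε → β) :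
    ∀ b, l.foldl (fun acc x => (g x).elim acc (fun e => h acc e)) b
      = (l.filterMap g).foldl h b := by
  induction l with
  | nil => intro b; rfl
  | cons x tl ih =>
    intro b
    cases hx : g x <;> simp [hx, ih]

lemma flatMap_if_singleton {α γ : Type} (l : List α) (r : α → Bool) (h : α → γ) :
    (l.flatMap fun x => if r x then [h x] else []) = (l.filter r).map h := by
  induction l with
  | nil => rfl
  | cons x tl ih =>
    by_cases hx : r x <;> simp [hx, ih]

lemma filterMap_range_single {γ : Type} (F j₀ : Nat) (g : Nat → Option γ) (hj : j₀ < F)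
    (hg : ∀ j, j < F → j ≠ j₀ → g j = none) :
    (List.range F).filterMap g = (g j₀).toList := by
  induction F with
  | zero => omega
  | succ n ih =>
    rw [List.range_succ, List.filterMap_append]
    by_cases h : j₀ = n
    · subst h
      have : (List.range j₀).filterMap g = [] := by
        rw [List.filterMap_eq_nil_iff]
        intro a ha
        exact hg a (by have := List.mem_range.mp ha; omega) (by have := List.mem_range.mp ha; omega)
      rw [this]
      cases hga : g j₀ <;> simp [List.filterMap, hga]
    · have hn : g n = none := hg n (Nat.lt_succ_self n) (fun he => h he.symm)
      rw [ih (by omega) (fun j hj' hne => hg j (by omega) hne)]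
      simp [List.filterMap, hn]

lemma length_foldl_bumpE (ev : List (Nat × Char)) :
    ∀ S : List (PySem.Set Char), (ev.foldl bumpE S).length = S.length := by
  induction ev with
  | nil => intro S; rfl
  | cons e tl ih => intro S; simp [List.foldl_cons, ih, bumpE, bump]

lemma foldl_bumpE_getD (ev : List (Nat × Char)) :
    ∀ (S : List (PySem.Set Char)) (j : Nat), j < S.length →
      (ev.foldl bumpE S).getD j PySem.Set.empty
        = List.foldl PySem.Set.add (S.getD j PySem.Set.empty)
            ((ev.filter (fun e => e.1 == j)).map (fun e => e.2)) := by
  induction ev with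
  | nil => intro S j hj; rfl
  | cons e tl ih =>
    intro S j hj
    rw [List.foldl_cons, List.filter_cons]
    by_cases h : e.1 = j
    · have hkeep : (e.1 == j) = true := by simpa using h
      rw [hkeep]
      simp only [if_true, List.map_cons, List.foldl_cons]
      rw [ih (bumpE S e) j (by simp [bumpE, bump]; exact hj)]
      congr 1
      subst h
      simp [bumpE, bump, List.getD_eq_getElem?_getD, List.getElem?_set_self']
      rw [List.getElem?_eq_getElem hj]
      simp
    · have hdrop : (e.1 == j) = false := by simpa using h
      rw [hdrop]
      simp only [Bool.false_eq_true, if_false]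
      rw [ih (bumpE S e) j (by simp [bumpE, bump]; exact hj)]
      congr 1
      simp only [bumpE, bump, List.getD_eq_getElem?_getD]
      rw [List.getElem?_set_ne h]

lemma set_equal_eq_sorted (x y : List Char) (hx : x.Nodup) (hy : y.Nodup) :
    PySem.Set.equal x y
      = (PySem.List.sorted x (fun c => c) false == PySem.List.sorted y (fun c => c) false) := by
  rw [Bool.eq_iff_iff]
  simp only [beq_iff_eq, PySem.List.sorted_id_eq_sorted_id_iff_perm]
  rw [List.perm_ext_iff_of_nodup hx hy]
  simp only [PySem.Set.equal, PySem.Set.issubset, PySem.Set.contains, Bool.and_eq_true,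
    List.all_eq_true, List.contains_eq_mem, decide_eq_true_eq]
  constructor
  · rintro ⟨h1, h2⟩ a; exact ⟨fun ha => h1 a ha, fun ha => h2 a ha⟩
  · intro h; exact ⟨fun a ha => (h a).1 ha, fun a ha => (h a).2 ha⟩

lemma code_eq (s : PySem.Set Char) (hs : s.Nodup) (u : Bool) : chars2code s u = code2 s u := by
  have hperm : (PySem.List.sorted s (fun c : Char => c) false).Perm s := PySem.List.sorted_perm s _ _
  have hlen : (PySem.List.sorted s (fun c : Char => c) false).length = s.length := hperm.length_eq
  unfold chars2code code2
  by_cases h1 : s.length = 1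
  · obtain ⟨a, ha⟩ := List.length_eq_one_iff.mp h1
    subst ha
    simp [PySem.Set.len, PySem.List.sorted_eq_self_of_pairwise]
  · have hl2 : ¬ PySem.Set.len s = 1 := by simp [PySem.Set.len]; omega
    have hk2 : ¬ (PySem.List.sorted s (fun c : Char => c) false).length = 1 := by omega
    rw [if_neg hl2]
    simp only [if_neg hk2]
    cases u
    · simp
    · simp only [if_true]
      have hset : ∀ a : List Char, a.Nodup →
          PySem.Set.equal a s
            = (PySem.List.sorted a (fun c => c) false == PySem.List.sorted s (fun c => c) false) :=
        fun a ha => set_equal_eq_sorted a s ha hs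
      have hone : ∀ a : Char,
          (([a] : List Char) == PySem.List.sorted s (fun c : Char => c) false) = false := by
        intro a
        rw [beq_eq_false_iff_ne]
        intro h
        apply hk2; rw [← h]; rfl
      simp only [iupacMap, codeTab, List.find?]
      rw [hset ['A'] (by decide), hset ['C'] (by decide), hset ['G'] (by decide),
          hset ['T'] (by decide), hset ['A','G'] (by decide), hset ['C','T'] (by decide),
          hset ['G','C'] (by decide), hset ['A','T'] (by decide), hset ['G','T'] (by decide),
          hset ['A','C'] (by decide), hset ['C','G','T'] (by decide), hset ['A','G','T'] (by decide),
          hset ['A','C','T'] (by decide), hset ['A','C','G'] (by decide),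
          hset ['A','C','G','T'] (by decide)]
      have e3 : PySem.List.sorted ['G','C'] (fun c : Char => c) false = ['C','G'] := by decide
      have e1 : PySem.List.sorted ['A','G'] (fun c : Char => c) false = ['A','G'] := by decide
      have e2 : PySem.List.sorted ['C','T'] (fun c : Char => c) false = ['C','T'] := by decide
      have e4 : PySem.List.sorted ['A','T'] (fun c : Char => c) false = ['A','T'] := by decide
      have e5 : PySem.List.sorted ['G','T'] (fun c : Char => c) false = ['G','T'] := by decide
      have e6 : PySem.List.sorted ['A','C'] (fun c : Char => c) false = ['A','C'] := by decide
      have e7 : PySem.List.sorted ['C','G','T'] (fun c : Char => c) false = ['C','G','T'] := by decide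
      have e8 : PySem.List.sorted ['A','G','T'] (fun c : Char => c) false = ['A','G','T'] := by decide
      have e9 : PySem.List.sorted ['A','C','T'] (fun c : Char => c) false = ['A','C','T'] := by decide
      have e10 : PySem.List.sorted ['A','C','G'] (fun c : Char => c) false = ['A','C','G'] := by decide
      have e11 : PySem.List.sorted ['A','C','G','T'] (fun c : Char => c) false = ['A','C','G','T'] := by decide
      have s1 : PySem.List.sorted ['A'] (fun c : Char => c) false = ['A'] := by decide
      have s2 : PySem.List.sorted ['C'] (fun c : Char => c) false = ['C'] := by decide
      have s3 : PySem.List.sorted ['G'] (fun c : Char => c) false = ['G'] := by decide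
      have s4 : PySem.List.sorted ['T'] (fun c : Char => c) false = ['T'] := by decide
      rw [e1, e2, e3, e4, e5, e6, e7, e8, e9, e10, e11, s1, s2, s3, s4]
      rw [hone 'A', hone 'C', hone 'G', hone 'T']
      by_cases c1 : (['A','G'] == PySem.List.sorted s (fun c : Char => c) false) <;>
        simp only [c1]
      by_cases c2 : (['C','T'] == PySem.List.sorted s (fun c : Char => c) false) <;>
        simp only [c2]
      by_cases c3 : (['C','G'] == PySem.List.sorted s (fun c : Char => c) false) <;>
        simp only [c3]

lemma perOcc_left (sl : List Char) (flank : Int) (i : Int) (c : Nat) (hc : c < flank.toNat) :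
    ((((PySem.List.pyRange 1 (flank + 1) 1).filterMap (lopt sl flank i)).filter
        (fun e => e.1 == c)).map (fun e => e.2))
      = if ((flank.toNat - c : Nat) : Int) ≤ i then
          [PySem.List.pyGetD sl (i - ((flank.toNat - c : Nat) : Int)) 'N']
        else [] := by
  rw [PySem.List.pyRange_one]
  have h2 : (flank + 1 - 1).toNat = flank.toNat := by omega
  rw [h2]
  rw [List.filterMap_map, List.filter_filterMap, List.map_filterMap]
  rw [filterMap_range_single flank.toNat (flank.toNat - 1 - c) _ (by omega)]
  · show (Option.map _ (Option.filter _ (lopt sl flank i (1 + ((flank.toNat - 1 - c : Nat) : Int))))).toList = _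
    unfold lopt
    have hf : (1 + ((flank.toNat - 1 - c : Nat) : Int)) = ((flank.toNat - c : Nat) : Int) := by omega
    rw [hf]
    by_cases hcond : 0 ≤ i - ((flank.toNat - c : Nat) : Int)
    · rw [if_pos hcond, if_pos (by omega)]
      have hidx : (flank - ((flank.toNat - c : Nat) : Int)).toNat = c := by omega
      simp [Option.filter, hidx]
    · rw [if_neg hcond, if_neg (by omega)]
      rfl
  · intro j hj hne
    show Option.map _ (Option.filter _ (lopt sl flank i (1 + (j : Int)))) = none
    unfold lopt
    by_cases hcond : 0 ≤ i - (1 + (j : Int))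
    · rw [if_pos hcond]
      have : ((flank - (1 + (j : Int))).toNat == c) = false := by
        rw [beq_eq_false_iff_ne]; omega
      simp [Option.filter, this]
    · rw [if_neg hcond]; rfl

lemma perOcc_right (sl : List Char) (flank : Int) (k : Nat) (i : Int) (c : Nat) (hc : c < flank.toNat) :
    ((((PySem.List.pyRange 1 (flank + 1) 1).filterMap (ropt sl k i)).filter
        (fun e => e.1 == c)).map (fun e => e.2))
      = if i + (k : Int) + (c : Int) < (sl.length : Int) then
          [PySem.List.pyGetD sl (i + (k : Int) + (c : Int)) 'N']
        else [] := by
  rw [PySem.List.pyRange_one]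
  have h2 : (flank + 1 - 1).toNat = flank.toNat := by omega
  rw [h2]
  rw [List.filterMap_map, List.filter_filterMap, List.map_filterMap]
  rw [filterMap_range_single flank.toNat c _ hc]
  · show (Option.map _ (Option.filter _ (ropt sl k i (1 + (c : Int))))).toList = _
    unfold ropt
    have hf : i + (k : Int) - 1 + (1 + (c : Int)) = i + (k : Int) + (c : Int) := by ring
    rw [hf]
    by_cases hcond : i + (k : Int) + (c : Int) < (sl.length : Int)
    · rw [if_pos hcond, if_pos hcond]
      have hidx2 : i + (k : Int) + (1 + (c : Int)) - 1 = i + (k : Int) + (c : Int) := by ring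
      simp [Option.filter, hidx2]
    · rw [if_neg hcond, if_neg hcond]; rfl
  · intro j hj hne
    show Option.map _ (Option.filter _ (ropt sl k i (1 + (j : Int)))) = none
    unfold ropt
    by_cases hcond : i + (k : Int) - 1 + (1 + (j : Int)) < (sl.length : Int)
    · rw [if_pos hcond]
      simp [Option.filter]
      omega
    · rw [if_neg hcond]; rfl


lemma stepI_pair (kl sl : List Char) (flank : Int)
    (st : List (PySem.Set Char) × List (PySem.Set Char)) (i : Int) :
    stepI kl sl flank st i = (lstepI kl sl flank st.1 i, rstepI kl sl flank st.2 i) := by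
  obtain ⟨L, R⟩ := st
  unfold stepI lstepI rstepI
  split
  · rfl
  · have h : stepF sl kl.length flank i
        = fun (s : List (PySem.Set Char) × List (PySem.Set Char)) f =>
            (lstepF sl flank i s.1 f, rstepF sl kl.length i s.2 f) := rfl
    rw [h]
    exact PySem.List.foldl_prod_mk _ _ _ _ _

lemma lstepI_fold (kl sl : List Char) (flank : Int) (L : List (PySem.Set Char)) :
    (PySem.List.pyRange 0 ((sl.length : Int) - (kl.length : Int) + 1) 1).foldl
        (lstepI kl sl flank) L
      = (levseq kl sl flank).foldl bumpE L := by
  unfold levseq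
  rw [List.foldl_flatMap]
  have hb : lstepI kl sl flank = fun L i =>
      (if PySem.List.slice sl (some i) (some (i + (kl.length : Int))) == kl then
        (PySem.List.pyRange 1 (flank + 1) 1).filterMap (lopt sl flank i)
      else []).foldl bumpE L := by
    funext L i
    unfold lstepI
    by_cases h : PySem.List.slice sl (some i) (some (i + (kl.length : Int))) = kl
    · rw [if_neg (not_not_intro h), if_pos (by simpa using h)]
      have hm : lstepF sl flank i = fun L f =>
          (lopt sl flank i f).elim L (fun e => bumpE L e) := by
        funext L f; unfold lstepF lopt bumpE bump; split <;> rfl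
      rw [hm]
      exact foldl_opt _ (lopt sl flank i) bumpE L
    · rw [if_pos h, if_neg (by simpa using h)]
      rfl
  rw [hb]

lemma rstepI_fold (kl sl : List Char) (flank : Int) (R : List (PySem.Set Char)) :
    (PySem.List.pyRange 0 ((sl.length : Int) - (kl.length : Int) + 1) 1).foldl
        (rstepI kl sl flank) R
      = (revseq kl sl flank).foldl bumpE R := by
  unfold revseq
  rw [List.foldl_flatMap]
  have hb : rstepI kl sl flank = fun R i =>
      (if PySem.List.slice sl (some i) (some (i + (kl.length : Int))) == kl then
        (PySem.List.pyRange 1 (flank + 1) 1).filterMap (ropt sl kl.length i)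
      else []).foldl bumpE R := by
    funext R i
    unfold rstepI
    by_cases h : PySem.List.slice sl (some i) (some (i + (kl.length : Int))) = kl
    · rw [if_neg (not_not_intro h), if_pos (by simpa using h)]
      have hm : rstepF sl kl.length i = fun R f =>
          (ropt sl kl.length i f).elim R (fun e => bumpE R e) := by
        funext R f; unfold rstepF ropt bumpE bump; split <;> rfl
      rw [hm]
      exact foldl_opt _ (ropt sl kl.length i) bumpE R
    · rw [if_pos h, if_neg (by simpa using h)]
      rfl
  rw [hb]

lemma seq_step_pair (kl : List Char) (flank : Int) (seq : String)
    (st : List (PySem.Set Char) × List (PySem.Set Char)) :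
    (PySem.List.pyRange 0 ((seq.toList.length : Int) - (kl.length : Int) + 1) 1).foldl
        (stepI kl seq.toList flank) st
      = ((levseq kl seq.toList flank).foldl bumpE st.1,
         (revseq kl seq.toList flank).foldl bumpE st.2) := by
  have h1 : stepI kl seq.toList flank = fun st i =>
      (lstepI kl seq.toList flank st.1 i, rstepI kl seq.toList flank st.2 i) := by
    funext st i; exact stepI_pair kl seq.toList flank st i
  rw [h1]
  obtain ⟨a, b⟩ := st
  rw [PySem.List.foldl_prod_mk]
  rw [lstepI_fold, rstepI_fold]

lemma A_state_gen (kl : List Char) (flank : Int) (seqs : List String) :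
    ∀ st : List (PySem.Set Char) × List (PySem.Set Char),
    seqs.foldl (fun st seq =>
        (PySem.List.pyRange 0 ((seq.toList.length : Int) - (kl.length : Int) + 1) 1).foldl
          (stepI kl seq.toList flank) st) st
      = ((seqs.flatMap (fun seq => levseq kl seq.toList flank)).foldl bumpE st.1,
         (seqs.flatMap (fun seq => revseq kl seq.toList flank)).foldl bumpE st.2) := by
  induction seqs with
  | nil => intro st; exact Prod.mk.eta.symm
  | cons s tl ih =>
    intro st
    rw [List.foldl_cons, seq_step_pair, ih]
    simp [List.foldl_append]

lemma A_state (kl : List Char) (flank : Int) (seqs : List String)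
    (init : List (PySem.Set Char)) :
    seqs.foldl (fun st seq =>
        (PySem.List.pyRange 0 ((seq.toList.length : Int) - (kl.length : Int) + 1) 1).foldl
          (stepI kl seq.toList flank) st) (init, init)
      = ((seqs.flatMap (fun seq => levseq kl seq.toList flank)).foldl bumpE init,
         (seqs.flatMap (fun seq => revseq kl seq.toList flank)).foldl bumpE init) :=
  A_state_gen kl flank seqs (init, init)

lemma left_stream_seq (kl sl : List Char) (flank : Int) (c : Nat) (hc : c < flank.toNat) :
    ((levseq kl sl flank).filter (fun e => e.1 == c)).map (fun e => e.2)
      = ((((PySem.List.pyRange 0 ((sl.length : Int) - (kl.length : Int) + 1) 1).filter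
              (fun i => PySem.List.slice sl (some i) (some (i + (kl.length : Int))) == kl)).map
            (fun i => (sl, i))).filter
          (fun p => p.2 ≥ ((flank.toNat - c : Nat) : Int))).map
        (fun p => PySem.List.pyGetD p.1 (p.2 - ((flank.toNat - c : Nat) : Int)) 'N') := by
  unfold levseq
  rw [List.filter_flatMap, List.map_flatMap]
  rw [List.filter_map, List.map_map, List.filter_filter]
  have hfun : (fun i =>
      ((if PySem.List.slice sl (some i) (some (i + (kl.length : Int))) == kl then
          (PySem.List.pyRange 1 (flank + 1) 1).filterMap (lopt sl flank i)
        else []).filter (fun e => e.1 == c)).map (fun e => e.2))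
      = fun i => if ((PySem.List.slice sl (some i) (some (i + (kl.length : Int))) == kl) &&
            ((fun p : List Char × Int => p.2 ≥ ((flank.toNat - c : Nat) : Int)) ∘
              (fun i => (sl, i))) i) then
          [((fun p : List Char × Int => PySem.List.pyGetD p.1 (p.2 - ((flank.toNat - c : Nat) : Int)) 'N') ∘
              (fun i => (sl, i))) i]
        else [] := by
    funext i
    by_cases h : PySem.List.slice sl (some i) (some (i + (kl.length : Int))) == kl
    · rw [if_pos h]
      rw [perOcc_left sl flank i c hc]
      by_cases h2 : ((flank.toNat - c : Nat) : Int) ≤ i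
      · simp [h, h2, Function.comp]
      · simp [h, h2, Function.comp]
    · simp [h]
  rw [hfun, flatMap_if_singleton]
  congr 1
  apply List.filter_congr
  intro a _
  simp [Function.comp, Bool.and_comm]

lemma right_stream_seq (kl sl : List Char) (flank : Int) (c : Nat) (hc : c < flank.toNat) :
    ((revseq kl sl flank).filter (fun e => e.1 == c)).map (fun e => e.2)
      = ((((PySem.List.pyRange 0 ((sl.length : Int) - (kl.length : Int) + 1) 1).filter
              (fun i => PySem.List.slice sl (some i) (some (i + (kl.length : Int))) == kl)).map
            (fun i => (sl, i))).filter
          (fun p => p.2 + (kl.length : Int) + (c : Int) < (p.1.length : Int))).map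
        (fun p => PySem.List.pyGetD p.1 (p.2 + (kl.length : Int) + (c : Int)) 'N') := by
  unfold revseq
  rw [List.filter_flatMap, List.map_flatMap]
  rw [List.filter_map, List.map_map, List.filter_filter]
  have hfun : (fun i =>
      ((if PySem.List.slice sl (some i) (some (i + (kl.length : Int))) == kl then
          (PySem.List.pyRange 1 (flank + 1) 1).filterMap (ropt sl kl.length i)
        else []).filter (fun e => e.1 == c)).map (fun e => e.2))
      = fun i => if ((PySem.List.slice sl (some i) (some (i + (kl.length : Int))) == kl) &&
            ((fun p : List Char × Int => p.2 + (kl.length : Int) + (c : Int) < (p.1.length : Int)) ∘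
              (fun i => (sl, i))) i) then
          [((fun p : List Char × Int => PySem.List.pyGetD p.1 (p.2 + (kl.length : Int) + (c : Int)) 'N') ∘
              (fun i => (sl, i))) i]
        else [] := by
    funext i
    by_cases h : PySem.List.slice sl (some i) (some (i + (kl.length : Int))) == kl
    · rw [if_pos h]
      rw [perOcc_right sl flank kl.length i c hc]
      by_cases h2 : i + (kl.length : Int) + (c : Int) < (sl.length : Int)
      · simp [h, h2, Function.comp]
      · simp [h, h2, Function.comp]
    · simp [h]
  rw [hfun, flatMap_if_singleton]
  congr 1
  apply List.filter_congr
  intro a _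
  simp [Function.comp, Bool.and_comm]

lemma left_cols (kl : List Char) (flank : Int) (seqs : List String) :
    (seqs.flatMap (fun seq => levseq kl seq.toList flank)).foldl bumpE
        (List.replicate flank.toNat PySem.Set.empty)
      = (List.range flank.toNat).map (fun c =>
          PySem.Set.ofList
            (((seqs.flatMap (fun seq =>
                  ((PySem.List.pyRange 0 ((seq.toList.length : Int) - (kl.length : Int) + 1) 1).filter
                      (fun i => PySem.List.slice seq.toList (some i) (some (i + (kl.length : Int))) == kl)).map
                    (fun i => (seq.toList, i)))).filter
                (fun p => p.2 ≥ ((flank.toNat - c : Nat) : Int))).map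
              (fun p => PySem.List.pyGetD p.1 (p.2 - ((flank.toNat - c : Nat) : Int)) 'N'))) := by
  apply List.ext_getElem
  · rw [length_foldl_bumpE]; simp
  · intro c hc1 hc2
    have hc : c < flank.toNat := by simpa using hc2
    rw [← List.getD_eq_getElem _ PySem.Set.empty hc1, ← List.getD_eq_getElem _ PySem.Set.empty hc2]
    rw [foldl_bumpE_getD _ _ c (by simpa using hc)]
    rw [List.getD_replicate _ hc]
    rw [List.getD_eq_getElem _ _ hc2]
    simp only [List.getElem_map, List.getElem_range]
    rw [PySem.Set.ofList_eq_foldl]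
    show List.foldl PySem.Set.add PySem.Set.empty _ = List.foldl PySem.Set.add [] _
    congr 1
    rw [List.filter_flatMap, List.map_flatMap, List.filter_flatMap, List.map_flatMap]
    congr 1
    funext seq
    exact left_stream_seq kl seq.toList flank c hc

lemma right_cols (kl : List Char) (flank : Int) (seqs : List String) :
    (seqs.flatMap (fun seq => revseq kl seq.toList flank)).foldl bumpE
        (List.replicate flank.toNat PySem.Set.empty)
      = (List.range flank.toNat).map (fun (c : Nat) =>
          PySem.Set.ofList
            (((seqs.flatMap (fun seq =>
                  ((PySem.List.pyRange 0 ((seq.toList.length : Int) - (kl.length : Int) + 1) 1).filter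
                      (fun i => PySem.List.slice seq.toList (some i) (some (i + (kl.length : Int))) == kl)).map
                    (fun i => (seq.toList, i)))).filter
                (fun p => p.2 + (kl.length : Int) + (c : Int) < (p.1.length : Int))).map
              (fun p => PySem.List.pyGetD p.1 (p.2 + (kl.length : Int) + (c : Int)) 'N'))) := by
  apply List.ext_getElem
  · rw [length_foldl_bumpE]; simp
  · intro c hc1 hc2
    have hc : c < flank.toNat := by simpa using hc2
    rw [← List.getD_eq_getElem _ PySem.Set.empty hc1, ← List.getD_eq_getElem _ PySem.Set.empty hc2]
    rw [foldl_bumpE_getD _ _ c (by simpa using hc)]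
    rw [List.getD_replicate _ hc]
    rw [List.getD_eq_getElem _ _ hc2]
    simp only [List.getElem_map, List.getElem_range]
    rw [PySem.Set.ofList_eq_foldl]
    show List.foldl PySem.Set.add PySem.Set.empty _ = List.foldl PySem.Set.add [] _
    congr 1
    rw [List.filter_flatMap, List.map_flatMap, List.filter_flatMap, List.map_flatMap]
    congr 1
    funext seq
    exact right_stream_seq kl seq.toList flank c hc

lemma main_eq (kmer : String) (seqs_pos : List String) (flank : Int) (use_iupac : Bool) :
    extend_motif kmer seqs_pos flank use_iupac = extend_motif_alt kmer seqs_pos flank use_iupac := by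
  simp only [extend_motif, extend_motif_alt]
  rw [A_state]
  rw [left_cols, right_cols]
  have hcode : ∀ cols : List (PySem.Set Char), (∀ s ∈ cols, s.Nodup) →
      cols.map (fun s => chars2code s use_iupac) = cols.map (fun s => code2 s use_iupac) :=
    fun cols h => List.map_congr_left (fun s hs => code_eq s (h s hs) use_iupac)
  have hnd : ∀ (g : Nat → List Char),
      ∀ s ∈ (List.range flank.toNat).map (fun c => PySem.Set.ofList (g c)), s.Nodup := by
    intro g s hs
    simp only [List.mem_map] at hs
    obtain ⟨c, -, hcs⟩ := hs
    rw [← hcs]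
    exact PySem.Set.nodup_ofList _
  rw [hcode _ (hnd _), hcode _ (hnd _)]

-- ===== VERDICT (by name: the statement is the Claim_ definition above) =====
theorem extend_motif_spec : Claim_equal_extend_motif := by
  intro kmer seqs_pos flank use_iupac _
  exact main_eq kmer seqs_pos flank use_iupac
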